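-- pv_equiv track=rewrite | github.com/softlab-unimore/crew | adapters.py | words_seq_to_pair
-- ===== SOURCE A (Python) =====
-- def words_seq_to_pair(words, attrs_mask=None):
--     if attrs_mask is None or len(attrs_mask) == 0:
--         attrs_mask = [-1] * len(words)
--
--     words_a = []
--     words_b = []
--     attrs_mask_a = []
--     attrs_mask_b = []
--
--     seps = 0
--     for w, a in zip(words, attrs_mask):
--         if w == '[CLS]':
--             continue
--         elif w == '[SEP]':
--             seps += 1
--             if seps == 2:
--                 break
--             else:
--                 continue
--         else:
--             (words_b if seps == 1 else words_a).append(w)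
--             (attrs_mask_b if seps == 1 else attrs_mask_a).append(int(a))
--
--     return words_a, words_b, attrs_mask_a, attrs_mask_b
-- ===== SOURCE B (Python) =====
-- def _first_sep(pairs):
--     for i, (w, _) in enumerate(pairs):
--         if w == '[SEP]':
--             return i
--     return len(pairs)
--
--
-- def words_seq_to_pair(words, attrs_mask=None):
--     if attrs_mask is None or len(attrs_mask) == 0:
--         attrs_mask = [-1] * len(words)
--     pairs = list(zip(words, attrs_mask))
--     s1 = _first_sep(pairs)
--     tail = pairs[s1 + 1:]
--     s2 = _first_sep(tail)
--     seg_a = [(w, a) for w, a in pairs[:s1] if w != '[CLS]']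
--     seg_b = [(w, a) for w, a in tail[:s2] if w != '[CLS]']
--     return ([w for w, _ in seg_a], [w for w, _ in seg_b],
--             [int(a) for _, a in seg_a], [int(a) for _, a in seg_b])
-- ===== Notes on version B (the rewrite author's own statement) =====
-- stated objective: alternative
-- what changed: Replaces A's single stateful loop (seps counter, conditional append targets, break) with an index-and-slice decomposition: find the first two [SEP] positions in the zipped list, slice the two segments, filter [CLS], and unzip each segment.
import Mathlib
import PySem

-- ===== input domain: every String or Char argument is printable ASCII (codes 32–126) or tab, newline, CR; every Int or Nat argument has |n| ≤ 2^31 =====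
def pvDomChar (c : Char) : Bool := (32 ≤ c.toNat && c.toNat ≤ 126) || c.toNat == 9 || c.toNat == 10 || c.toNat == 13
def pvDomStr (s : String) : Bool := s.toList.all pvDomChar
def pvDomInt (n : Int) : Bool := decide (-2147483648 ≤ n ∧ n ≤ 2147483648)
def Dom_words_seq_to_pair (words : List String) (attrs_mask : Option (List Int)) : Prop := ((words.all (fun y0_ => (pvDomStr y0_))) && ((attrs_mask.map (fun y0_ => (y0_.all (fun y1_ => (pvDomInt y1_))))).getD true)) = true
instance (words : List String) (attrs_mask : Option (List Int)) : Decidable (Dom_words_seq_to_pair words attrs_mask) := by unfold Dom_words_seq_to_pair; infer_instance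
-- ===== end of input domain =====

-- B replaces A's single stateful loop (seps counter, conditional append targets, break)
-- with an index-and-slice decomposition: find the two [SEP] positions, slice, filter [CLS], unzip.

-- ===== PORT A =====
-- the shared default for attrs_mask: None or [] becomes [-1] * len(words)
def pvDefaultMask (words : List String) (attrs_mask : Option (List Int)) : List Int :=
  match attrs_mask with
  | none => List.replicate words.length (-1)
  | some m => if m.length = 0 then List.replicate words.length (-1) else m

-- A's loop over zip(words, attrs_mask) with the seps counter; break at seps == 2
def pvLoopA : List (String × Int) → Nat → List String × List String × List Int × List Int
  | [], _ => ([], [], [], [])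
  | (w, a) :: t, seps =>
    if w = "[CLS]" then pvLoopA t seps
    else if w = "[SEP]" then
      if seps + 1 = 2 then ([], [], [], [])
      else pvLoopA t (seps + 1)
    else
      let r := pvLoopA t seps
      if seps = 1 then (r.1, w :: r.2.1, r.2.2.1, a :: r.2.2.2)
      else (w :: r.1, r.2.1, a :: r.2.2.1, r.2.2.2)

def words_seq_to_pair (words : List String) (attrs_mask : Option (List Int)) : List String × List String × List Int × List Int :=
  pvLoopA (words.zip (pvDefaultMask words attrs_mask)) 0

-- ===== PORT B =====
-- index of the first '[SEP]' in pairs, or len(pairs) if none (B's helper _first_sep)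
def pvFirstSep : List (String × Int) → Nat
  | [] => 0
  | (w, _) :: t => if w = "[SEP]" then 0 else pvFirstSep t + 1

def words_seq_to_pair_alt (words : List String) (attrs_mask : Option (List Int)) : List String × List String × List Int × List Int :=
  let pairs := words.zip (pvDefaultMask words attrs_mask)
  let s1 := pvFirstSep pairs
  let tail := pairs.drop (s1 + 1)
  let s2 := pvFirstSep tail
  let segA := (pairs.take s1).filter (fun p => p.1 ≠ "[CLS]")
  let segB := (tail.take s2).filter (fun p => p.1 ≠ "[CLS]")
  (segA.map Prod.fst, segB.map Prod.fst, segA.map Prod.snd, segB.map Prod.snd)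

-- ===== PRECONDITION & SPEC =====
def Spec_words_seq_to_pair (words : List String) (attrs_mask : Option (List Int)) (out : List String × List String × List Int × List Int) : Prop := out = words_seq_to_pair_alt words attrs_mask
instance (words : List String) (attrs_mask : Option (List Int)) (out : List String × List String × List Int × List Int) : Decidable (Spec_words_seq_to_pair words attrs_mask out) := by unfold Spec_words_seq_to_pair; infer_instance

-- ===== CLAIM (what is proved, stated in full; the proofs are below) =====
def Claim_equal_words_seq_to_pair : Prop := ∀ (words : List String) (attrs_mask : Option (List Int)), Dom_words_seq_to_pair words attrs_mask → Spec_words_seq_to_pair words attrs_mask (words_seq_to_pair words attrs_mask)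

-- ===== LEMMAS AND PROOFS =====

-- B's result as a function of the zipped list alone
def pvAltCore (ps : List (String × Int)) : List String × List String × List Int × List Int :=
  let s1 := pvFirstSep ps
  let tail := ps.drop (s1 + 1)
  let s2 := pvFirstSep tail
  let segA := (ps.take s1).filter (fun p => p.1 ≠ "[CLS]")
  let segB := (tail.take s2).filter (fun p => p.1 ≠ "[CLS]")
  (segA.map Prod.fst, segB.map Prod.fst, segA.map Prod.snd, segB.map Prod.snd)

-- after the first [SEP], A collects the filtered prefix up to the next [SEP] into the B-components
lemma pvLoopA_one (ps : List (String × Int)) :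
    pvLoopA ps 1 =
      ([], ((ps.take (pvFirstSep ps)).filter (fun p => p.1 ≠ "[CLS]")).map Prod.fst,
       [], ((ps.take (pvFirstSep ps)).filter (fun p => p.1 ≠ "[CLS]")).map Prod.snd) := by
  induction ps with
  | nil => simp [pvLoopA, pvFirstSep]
  | cons hd t ih =>
    obtain ⟨w, a⟩ := hd
    by_cases hc : w = "[CLS]"
    · have hs : w ≠ "[SEP]" := by simp [hc]
      simp [pvLoopA, pvFirstSep, hc, ih]
    · by_cases hsep : w = "[SEP]"
      · simp [pvLoopA, pvFirstSep, hsep]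
      · simp [pvLoopA, pvFirstSep, hc, hsep, ih]

-- the main invariant: A's loop from seps = 0 equals B's slicing decomposition
lemma pvLoopA_zero (ps : List (String × Int)) : pvLoopA ps 0 = pvAltCore ps := by
  induction ps with
  | nil => simp [pvLoopA, pvAltCore, pvFirstSep]
  | cons hd t ih =>
    obtain ⟨w, a⟩ := hd
    by_cases hc : w = "[CLS]"
    · have hs : w ≠ "[SEP]" := by simp [hc]
      simp [pvLoopA, pvAltCore, pvFirstSep, hc] at *
      exact ih
    · by_cases hsep : w = "[SEP]"
      · simp [pvLoopA, pvAltCore, pvFirstSep, hsep, pvLoopA_one]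
      · simp [pvLoopA, pvAltCore, pvFirstSep, hc, hsep, ih] at *

-- ===== VERDICT (by name: the statement is the Claim_ definition above) =====
theorem words_seq_to_pair_spec : Claim_equal_words_seq_to_pair := by
  intro words attrs_mask _
  unfold Spec_words_seq_to_pair words_seq_to_pair words_seq_to_pair_alt
  exact pvLoopA_zero _
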